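-- pv_equiv track=rewrite | github.com/bennett-nguyen/Funkin-Pi | load/file_loader.py | process_info_diff
-- ===== SOURCE A (Python) =====
-- import itertools
--
-- def process_info_diff(array):
--     lower_case_text = [
--         difficulty.lower() for difficulty in array
--     ]
--
--     remove_junk = [
--         difficulty for difficulty in list(set(lower_case_text)) if difficulty in ["easy", "normal", "hard"]
--     ]
--
--     return [
--         string for order, string in itertools.product(("e", "n", "h"), remove_junk) if string[0] == order
--     ]
-- ===== SOURCE B (Python) =====
-- def process_info_diff(array):
--     seen = set(difficulty.lower() for difficulty in array)
--     return [difficulty for difficulty in ("easy", "normal", "hard") if difficulty in seen]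
-- ===== Notes on version B (the rewrite author's own statement) =====
-- stated objective: idiomatic
-- what changed: B iterates the three canonical labels in order and tests set membership once, replacing A's lower/dedupe/filter pipeline and its itertools.product first-character re-ordering pass.
import Mathlib
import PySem

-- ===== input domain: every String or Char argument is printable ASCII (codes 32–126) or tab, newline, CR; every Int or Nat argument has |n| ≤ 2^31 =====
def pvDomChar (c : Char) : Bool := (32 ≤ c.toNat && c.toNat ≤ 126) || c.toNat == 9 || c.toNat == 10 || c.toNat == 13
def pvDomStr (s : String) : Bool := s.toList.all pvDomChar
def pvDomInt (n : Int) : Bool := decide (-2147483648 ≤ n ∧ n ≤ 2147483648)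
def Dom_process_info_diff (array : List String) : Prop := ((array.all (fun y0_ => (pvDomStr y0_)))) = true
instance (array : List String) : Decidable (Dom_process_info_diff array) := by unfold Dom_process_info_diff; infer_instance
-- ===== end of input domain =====

-- B iterates the canonical labels and tests set membership, instead of A's dedupe/filter/product re-ordering pipeline (same result, different decomposition).

-- ===== PORT A =====
-- string[0] == order, ported via Str.pyGet?; none (IndexError, empty string) compares false —
-- unreachable: every element of remove_junk is one of "easy"/"normal"/"hard".
def process_info_diff (array : List String) : List String :=
  let lower_case_text := array.map PySem.Str.lower
  let remove_junk :=
    (PySem.Set.ofList lower_case_text).filter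
      (fun difficulty => (["easy", "normal", "hard"] : List String).contains difficulty)
  (["e", "n", "h"] : List String).flatMap (fun order =>
    remove_junk.filter (fun s =>
      (PySem.Str.pyGet? s 0).map (fun c => String.ofList [c]) == some order))

-- ===== PORT B =====
def process_info_diff_alt (array : List String) : List String :=
  let seen : PySem.Set String := PySem.Set.ofList (array.map PySem.Str.lower)
  (["easy", "normal", "hard"] : List String).filter (fun difficulty => PySem.Set.contains seen difficulty)

-- ===== PRECONDITION & SPEC =====
def Spec_process_info_diff (array : List String) (out : List String) : Prop := out = process_info_diff_alt array
instance (array : List String) (out : List String) : Decidable (Spec_process_info_diff array out) := by unfold Spec_process_info_diff; infer_instance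

-- ===== CLAIM (what is proved, stated in full; the proofs are below) =====
def Claim_equal_process_info_diff : Prop := ∀ (array : List String), Dom_process_info_diff array → Spec_process_info_diff array (process_info_diff array)

-- ===== LEMMAS AND PROOFS =====

-- a filter whose predicate picks out exactly `a`, on a duplicate-free list, yields [a] or []
theorem pv_filter_unique {α : Type} [DecidableEq α] (l : List α) (p : α → Bool) (a : α)
    (hnd : l.Nodup) (h : ∀ x ∈ l, (p x = true ↔ x = a)) :
    l.filter p = if a ∈ l then [a] else [] := by
  induction l with
  | nil => simp
  | cons x xs ih =>
    rcases List.nodup_cons.mp hnd with ⟨hx, hxs⟩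
    by_cases hpx : p x = true
    · have hxa : x = a := (h x (by simp)).mp hpx
      subst hxa
      have hfil : xs.filter p = [] := by
        apply List.filter_eq_nil_iff.mpr
        intro y hy hpy
        exact hx (((h y (by simp [hy])).mp hpy) ▸ hy)
      simp [hpx, hfil]
    · have hxa : x ≠ a := fun he => hpx ((h x (by simp)).mpr he)
      have := ih hxs (fun y hy => h y (by simp [hy]))
      simp only [List.filter_cons, if_neg hpx, this, List.mem_cons]
      by_cases hm : a ∈ xs <;> simp [hm, Ne.symm hxa]

theorem pv_rj_filter (L : List String) (hnd : L.Nodup) (a o : String)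
    (hcont : (["easy", "normal", "hard"] : List String).contains a = true)
    (hchar : ∀ x ∈ (["easy", "normal", "hard"] : List String),
      (((PySem.Str.pyGet? x 0).map (fun c => String.ofList [c]) == some o) = true ↔ x = a)) :
    (L.filter (fun d => (["easy", "normal", "hard"] : List String).contains d)).filter
      (fun s => (PySem.Str.pyGet? s 0).map (fun c => String.ofList [c]) == some o)
    = if a ∈ L then [a] else [] := by
  rw [pv_filter_unique _ _ a (List.Nodup.filter _ hnd)
    (fun x hx => hchar x (List.mem_of_elem_eq_true (List.mem_filter.mp hx).2))]
  have hmem := List.mem_of_elem_eq_true hcont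
  by_cases haL : a ∈ L
  · simp only [List.mem_cons, List.not_mem_nil, or_false] at hmem
    simp only [List.mem_filter, haL, true_and]
    rcases hmem with rfl | rfl | rfl <;> simp
  · simp [List.mem_filter, haL]

theorem process_info_diff_eq (array : List String) :
    process_info_diff array = process_info_diff_alt array := by
  simp only [process_info_diff, process_info_diff_alt]
  set L := PySem.Set.ofList (List.map PySem.Str.lower array) with hL
  have hnd : L.Nodup := PySem.Set.nodup_ofList _
  rw [List.flatMap_cons, List.flatMap_cons, List.flatMap_cons, List.flatMap_nil]
  rw [pv_rj_filter L hnd "easy" "e" (by decide) (by decide),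
      pv_rj_filter L hnd "normal" "n" (by decide) (by decide),
      pv_rj_filter L hnd "hard" "h" (by decide) (by decide)]
  simp only [List.filter_cons, List.filter_nil]
  by_cases h1 : ("easy" : String) ∈ L <;> by_cases h2 : ("normal" : String) ∈ L <;>
    by_cases h3 : ("hard" : String) ∈ L <;>
    simp [h1, h2, h3]

-- ===== VERDICT (by name: the statement is the Claim_ definition above) =====
theorem process_info_diff_spec : Claim_equal_process_info_diff := by
  intro array _
  exact process_info_diff_eq array
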